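-- pv_equiv track=rewrite | github.com/OpenFactoryTwin/ofact | ofact/twin/agent_control/behaviours/planning/process.py | _match_origin_destination
-- ===== SOURCE A (Python) =====
-- def _match_origin_destination(available_resources, possible_origin_resources, possible_destination_resources):
--     assigned_possible_origin_resources = \
--         [resource for resource in available_resources if resource in possible_origin_resources]
--     assigned_possible_destination_resources = \
--         [resource for resource in available_resources if resource in possible_destination_resources]
--
--     if len(assigned_possible_origin_resources) == 1:
--         origin = assigned_possible_origin_resources[0]
--     else:
--         origin = None
--
--     if len(assigned_possible_destination_resources) == 1:
--         destination = assigned_possible_destination_resources[0]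
--     else:
--         destination = None
--
--     return origin, destination
-- ===== SOURCE B (Python) =====
-- def _match_origin_destination(available_resources, possible_origin_resources, possible_destination_resources):
--     def unique_match(candidates):
--         # find the first available resource in candidates, then verify there is
--         # no second one (early exit); None if no match or more than one match
--         cset = set(candidates)
--         it = iter(available_resources)
--         for resource in it:
--             if resource in cset:
--                 for later in it:
--                     if later in cset:
--                         return None
--                 return resource
--         return None
--     return unique_match(possible_origin_resources), unique_match(possible_destination_resources)
-- ===== Notes on version B (the rewrite author's own statement) =====
-- stated objective: faster
-- what changed: Instead of materializing two filtered lists and testing their lengths, B searches each side for the first matching resource and then only verifies that no second match follows, short-circuiting to None as soon as a second match is seen; membership is a set built once per side.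
import Mathlib
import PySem

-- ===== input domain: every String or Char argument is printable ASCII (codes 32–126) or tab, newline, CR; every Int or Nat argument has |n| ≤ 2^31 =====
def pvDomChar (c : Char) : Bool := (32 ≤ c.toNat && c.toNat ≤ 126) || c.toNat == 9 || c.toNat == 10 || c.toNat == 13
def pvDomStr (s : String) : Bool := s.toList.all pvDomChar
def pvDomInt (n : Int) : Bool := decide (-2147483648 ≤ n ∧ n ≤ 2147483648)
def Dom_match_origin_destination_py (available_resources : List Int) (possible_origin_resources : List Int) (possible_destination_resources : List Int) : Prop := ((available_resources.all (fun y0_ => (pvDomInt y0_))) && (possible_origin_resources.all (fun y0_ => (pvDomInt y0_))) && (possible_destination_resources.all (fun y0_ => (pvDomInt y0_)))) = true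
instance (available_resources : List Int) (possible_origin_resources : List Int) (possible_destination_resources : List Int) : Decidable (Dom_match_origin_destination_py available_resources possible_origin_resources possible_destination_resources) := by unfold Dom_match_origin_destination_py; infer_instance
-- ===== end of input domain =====

-- B replaces A's two filtered comprehensions by a per-side search: find the first match,
-- then only verify that no second match follows (early exit); objective: faster.

-- ===== PORT A =====
def match_origin_destination_py (available_resources : List Int) (possible_origin_resources : List Int) (possible_destination_resources : List Int) : Option Int × Option Int :=
  let assigned_possible_origin_resources :=
    available_resources.filter (fun resource => possible_origin_resources.contains resource)
  let assigned_possible_destination_resources :=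
    available_resources.filter (fun resource => possible_destination_resources.contains resource)
  let origin : Option Int :=
    if assigned_possible_origin_resources.length = 1 then
      PySem.List.pyGet? assigned_possible_origin_resources 0
    else none
  let destination : Option Int :=
    if assigned_possible_destination_resources.length = 1 then
      PySem.List.pyGet? assigned_possible_destination_resources 0
    else none
  (origin, destination)

-- ===== PORT B =====
-- Source B's unique_match: scan for the first resource in cset; once found, scan the rest
-- for any later match (early exit to none), else return the found resource.
def uniqueMatchLoop (cset : PySem.Set Int) : List Int → Option Int
  | [] => none
  | resource :: rest =>
      if PySem.Set.contains cset resource then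
        if rest.any (fun later => PySem.Set.contains cset later) then none else some resource
      else uniqueMatchLoop cset rest

def match_origin_destination_py_alt (available_resources : List Int) (possible_origin_resources : List Int) (possible_destination_resources : List Int) : Option Int × Option Int :=
  (uniqueMatchLoop (PySem.Set.ofList possible_origin_resources) available_resources,
   uniqueMatchLoop (PySem.Set.ofList possible_destination_resources) available_resources)

-- ===== PRECONDITION & SPEC =====
def Spec_match_origin_destination_py (available_resources : List Int) (possible_origin_resources : List Int) (possible_destination_resources : List Int) (out : Option Int × Option Int) : Prop := out = match_origin_destination_py_alt available_resources possible_origin_resources possible_destination_resources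
instance (available_resources : List Int) (possible_origin_resources : List Int) (possible_destination_resources : List Int) (out : Option Int × Option Int) : Decidable (Spec_match_origin_destination_py available_resources possible_origin_resources possible_destination_resources out) := by unfold Spec_match_origin_destination_py; infer_instance

-- ===== CLAIM (what is proved, stated in full; the proofs are below) =====
def Claim_equal_match_origin_destination_py : Prop := ∀ (available_resources : List Int) (possible_origin_resources : List Int) (possible_destination_resources : List Int), Dom_match_origin_destination_py available_resources possible_origin_resources possible_destination_resources → Spec_match_origin_destination_py available_resources possible_origin_resources possible_destination_resources (match_origin_destination_py available_resources possible_origin_resources possible_destination_resources)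

-- ===== LEMMAS AND PROOFS =====

-- the filter through set(xs) selects the same elements as the filter through xs
theorem filter_ofList_contains (po : List Int) (a : List Int) :
    a.filter (fun r => PySem.Set.contains (PySem.Set.ofList po) r) =
      a.filter (fun r => po.contains r) := by
  apply List.filter_congr
  intro x _
  simp [PySem.Set.mem_ofList]

-- per side: B's "first match unless a second follows" equals
-- A's "head of the filtered list if it is a singleton"
theorem uniqueMatch_eq_filter (cset : PySem.Set Int) (a : List Int) :
    uniqueMatchLoop cset a =
      (if (a.filter (fun r => PySem.Set.contains cset r)).length = 1 then
        PySem.List.pyGet? (a.filter (fun r => PySem.Set.contains cset r)) 0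
      else none) := by
  induction a with
  | nil => simp [uniqueMatchLoop]
  | cons r rest ih =>
    by_cases h : PySem.Set.contains cset r
    · simp only [uniqueMatchLoop, h, if_true, List.filter_cons_of_pos h]
      by_cases h2 : rest.any (fun later => PySem.Set.contains cset later)
      · have hne : (rest.filter (fun r => PySem.Set.contains cset r)) ≠ [] := by
          rcases List.any_eq_true.mp h2 with ⟨x, hx, hpx⟩
          exact List.ne_nil_of_mem (List.mem_filter.mpr ⟨hx, hpx⟩)
        have hpos : 0 < (rest.filter (fun r => PySem.Set.contains cset r)).length :=
          List.length_pos_iff.mpr hne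
        have hlen : (r :: rest.filter (fun r => PySem.Set.contains cset r)).length ≠ 1 := by
          simp only [List.length_cons]; omega
        simp only [h2, if_true, if_neg hlen]
      · have hnil : (rest.filter (fun r => PySem.Set.contains cset r)) = [] := by
          simp only [List.filter_eq_nil_iff]
          intro x hx hmem
          exact h2 (List.any_eq_true.mpr ⟨x, hx, by simpa using hmem⟩)
        have hall : ∀ x ∈ rest, x ∉ cset := by
          intro x hx hmem
          exact h2 (List.any_eq_true.mpr ⟨x, hx, by simpa using hmem⟩)
        simp [hnil, PySem.List.pyGet?, PySem.List.pyIdx?]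
        exact hall
    · simp only [uniqueMatchLoop, h, List.filter_cons_of_neg h]
      exact ih

-- ===== VERDICT (by name: the statement is the Claim_ definition above) =====
theorem match_origin_destination_py_spec : Claim_equal_match_origin_destination_py := by
  intro a po pd _
  unfold Spec_match_origin_destination_py match_origin_destination_py match_origin_destination_py_alt
  simp only [uniqueMatch_eq_filter, filter_ofList_contains]
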